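-- pv_equiv track=rewrite | github.com/mangelsr/Deber2-Seguridad | decipher.py | a1z26
-- ===== SOURCE A (Python) =====
-- def a1z26(message):
--
--     decoded = ""
--
--     number = ''
--
--     for character in message:
--
--         if ord(character) in range(48, 58):
--
--             number += character
--
--         else:
--
--             if (number != ''):
--
--                 decoded += chr(int(number) + 64)
--
--             if (character != '-'):
--
--                 decoded += character
--
--             number = ''
--
--     if number != '':
--
--         decoded += chr(int(number) + 64)
--
--     return decoded
-- ===== SOURCE B (Python) =====
-- def a1z26(message):
--     # Two-pointer run extraction: jump over each maximal digit run at once,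
--     # no pending-number accumulator and no flush-on-boundary/final-flush logic.
--     out = []
--     i, n = 0, len(message)
--     while i < n:
--         c = message[i]
--         if '0' <= c <= '9':
--             j = i + 1
--             while j < n and '0' <= message[j] <= '9':
--                 j += 1
--             out.append(chr(int(message[i:j]) + 64))
--             i = j
--         else:
--             if c != '-':
--                 out.append(c)
--             i += 1
--     return ''.join(out)
-- ===== Notes on version B (the rewrite author's own statement) =====
-- stated objective: alternative
-- what changed: A scans char-by-char with a pending-number string accumulator flushed on every non-digit boundary and once more at the end; B uses a two-pointer scan that extracts each maximal digit run in one jump and decodes it immediately, with no accumulator and no flush logic.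
-- outside the precondition, e.g. on a1z26('9999999'): A raises ValueError, B raises ValueError
import Mathlib
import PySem

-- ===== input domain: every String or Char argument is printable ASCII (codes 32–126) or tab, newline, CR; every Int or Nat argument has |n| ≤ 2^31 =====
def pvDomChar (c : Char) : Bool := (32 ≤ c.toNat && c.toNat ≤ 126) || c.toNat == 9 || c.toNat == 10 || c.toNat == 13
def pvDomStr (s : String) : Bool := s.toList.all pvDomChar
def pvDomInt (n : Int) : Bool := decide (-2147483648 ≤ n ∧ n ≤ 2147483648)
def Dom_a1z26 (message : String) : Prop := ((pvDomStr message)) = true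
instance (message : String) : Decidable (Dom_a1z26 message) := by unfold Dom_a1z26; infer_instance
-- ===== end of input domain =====

-- B replaces A's pending-number accumulator with a two-pointer scan that decodes each
-- maximal digit run in one jump (objective: alternative structure, same O(n) cost).

-- int(number) for a string of ASCII digits (exact there), shared numeric helper
def pvVal (ds : List Char) : Nat := ds.foldl (fun a c => 10 * a + (c.toNat - 48)) 0
-- chr(int(ds) + 64)
def pvChr (ds : List Char) : Char := Char.ofNat (pvVal ds + 64)

-- ===== PORT A =====
def pvStepA (st : List Char × List Char) (character : Char) : List Char × List Char :=
  if 48 ≤ character.toNat ∧ character.toNat < 58 then      -- ord(character) in range(48, 58)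
    (st.1, st.2 ++ [character])
  else
    let d1 := if st.2 ≠ [] then st.1 ++ [pvChr st.2] else st.1
    let d2 := if character ≠ '-' then d1 ++ [character] else d1
    (d2, [])

def a1z26 (message : String) : String :=
  let st := message.toList.foldl pvStepA ([], [])
  let decoded := if st.2 ≠ [] then st.1 ++ [pvChr st.2] else st.1
  String.mk decoded

-- ===== PORT B =====
def pvDigB (c : Char) : Bool := '0' ≤ c && c ≤ '9'

def altGo : List Char → List Char
  | [] => []
  | c :: cs =>
    if pvDigB c then
      pvChr (c :: cs.takeWhile pvDigB) :: altGo (cs.dropWhile pvDigB)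
    else if c ≠ '-' then c :: altGo cs else altGo cs
  termination_by l => l.length
  decreasing_by
    · exact Nat.lt_succ_of_le (List.length_dropWhile_le _ _)
    · simp
    · simp

def a1z26_alt (message : String) : String := String.mk (altGo message.toList)

-- ===== PRECONDITION & SPEC =====
-- values of the maximal digit runs of the input (an input property, not either algorithm);
-- structural recursion with a pending-value accumulator so that `decide` can evaluate it
def pvRunsGo : Option Nat → List Char → List Nat
  | acc, [] => acc.toList
  | acc, c :: cs =>
    if pvDigB c then pvRunsGo (some (10 * acc.getD 0 + (c.toNat - 48))) cs
    else acc.toList ++ pvRunsGo none cs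

def pvRunVals (l : List Char) : List Nat := pvRunsGo none l

-- Pre_ excludes only inputs with a digit run decoding to a UTF-16 surrogate code point
-- (0xD800-0xDFFF: Python's A returns a lone-surrogate string, which is not a value of the
-- Lean String type) or to a value at or above 0x110000 (chr raises ValueError in both A and B).
def Pre_a1z26 (message : String) : Prop :=
  ∀ v ∈ pvRunVals message.toList,
    v + 64 < 0x110000 ∧ ¬ (0xD800 ≤ v + 64 ∧ v + 64 < 0xE000)
instance (message : String) : Decidable (Pre_a1z26 message) := by unfold Pre_a1z26; infer_instance

def pvWitness_a1z26 : String := "20-5 hi 26!"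

def Spec_a1z26 (message : String) (out : String) : Prop := out = a1z26_alt message
instance (message : String) (out : String) : Decidable (Spec_a1z26 message out) := by unfold Spec_a1z26; infer_instance

-- ===== CLAIM (what is proved, stated in full; the proofs are below) =====
def Claim_equal_a1z26 : Prop := ∀ (message : String), Dom_a1z26 message → Pre_a1z26 message → Spec_a1z26 message (a1z26 message)

-- ===== LEMMAS AND PROOFS =====

def pvEmit (n : List Char) : List Char := if n ≠ [] then [pvChr n] else []

def pvFin (st : List Char × List Char) : List Char := if st.2 ≠ [] then st.1 ++ [pvChr st.2] else st.1

def pvFlush : List Char → List Char → List Char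
  | number, [] => pvEmit number
  | number, c :: cs =>
    if pvDigB c then pvFlush (number ++ [c]) cs
    else pvEmit number ++ (if c ≠ '-' then [c] else []) ++ pvFlush [] cs

lemma digA_iff (c : Char) : (48 ≤ c.toNat ∧ c.toNat < 58) ↔ pvDigB c = true := by
  simp only [pvDigB, Bool.and_eq_true, decide_eq_true_eq, Char.le_def, UInt32.le_iff_toNat_le]
  show _ ↔ (48 ≤ c.val.toNat ∧ c.val.toNat ≤ 57)
  simp only [Char.toNat]
  omega

lemma flush_cons_nondig (number : List Char) (c : Char) (cs : List Char) (hc : ¬ pvDigB c = true) :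
    pvFlush number (c :: cs) = pvEmit number ++ (if c ≠ '-' then [c] else []) ++ pvFlush [] cs := by
  rw [pvFlush.eq_def]; simp [hc]

lemma stepA_shift (decoded number : List Char) (c : Char) :
    pvStepA (decoded, number) c =
      (decoded ++ (pvStepA ([], number) c).1, (pvStepA ([], number) c).2) := by
  simp only [pvStepA]
  split_ifs <;> simp

lemma foldl_shift (l : List Char) (decoded number : List Char) :
    pvFin (l.foldl pvStepA (decoded, number)) = decoded ++ pvFin (l.foldl pvStepA ([], number)) := by
  induction l generalizing decoded number with
  | nil =>
    simp only [List.foldl_nil, pvFin]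
    split_ifs <;> simp
  | cons c cs ih =>
    simp only [List.foldl_cons]
    rw [stepA_shift, ih, ih ((pvStepA ([], number) c).1)]
    simp [List.append_assoc]

lemma foldl_flush (l : List Char) (number : List Char) :
    pvFin (l.foldl pvStepA ([], number)) = pvFlush number l := by
  induction l generalizing number with
  | nil => simp [pvFin, pvFlush, pvEmit]
  | cons c cs ih =>
    simp only [List.foldl_cons, pvFlush]
    by_cases hc : pvDigB c = true
    · rw [if_pos hc]
      have hA : pvStepA ([], number) c = ([], number ++ [c]) := by
        simp [pvStepA, (digA_iff c).2 hc]
      rw [hA, ih]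
    · rw [if_neg hc]
      have hA : pvStepA ([], number) c = (pvEmit number ++ (if c ≠ '-' then [c] else []), []) := by
        simp only [pvStepA, pvEmit]
        rw [if_neg (fun h => hc ((digA_iff c).1 h))]
        split_ifs <;> simp
      rw [hA]
      have := foldl_shift cs (pvEmit number ++ (if c ≠ '-' then [c] else [])) []
      rw [this, ih]

lemma flush_pending (l : List Char) (number : List Char) (h : number ≠ []) :
    pvFlush number l = pvChr (number ++ l.takeWhile pvDigB) :: pvFlush [] (l.dropWhile pvDigB) := by
  induction l generalizing number with
  | nil => simp [pvFlush, pvEmit, h]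
  | cons c cs ih =>
    by_cases hc : pvDigB c = true
    · rw [pvFlush, if_pos hc, ih _ (by simp)]
      simp [hc, List.append_assoc]
    · rw [flush_cons_nondig _ _ _ hc]
      simp only [List.takeWhile_cons, List.dropWhile_cons, hc, Bool.false_eq_true, if_false]
      rw [flush_cons_nondig [] _ _ hc]
      simp [pvEmit, h]

lemma flush_eq_altGo (l : List Char) : pvFlush [] l = altGo l := by
  fun_induction altGo l with
  | case1 => simp [pvFlush, pvEmit]
  | case2 c cs hc ih =>
    rw [pvFlush, if_pos hc, flush_pending _ _ (by simp), ih]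
    simp
  | case3 c cs hc hne ih =>
    rw [flush_cons_nondig _ _ _ hc, ih]
    simp [pvEmit, hne]
  | case4 c cs hc hne ih =>
    rw [flush_cons_nondig _ _ _ hc, ih]
    simp [pvEmit, hne]

-- ===== VERDICT (by name: the statement is the Claim_ definition above) =====
theorem a1z26_spec : Claim_equal_a1z26 := by
  intro message _dom _pre
  show a1z26 message = a1z26_alt message
  simp only [a1z26, a1z26_alt]
  exact congrArg String.mk ((foldl_flush message.toList []).trans (flush_eq_altGo message.toList))
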